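-- pv_equiv track=rewrite | github.com/thesilversverker/COMSCC-Classification-Tool | data-source/styles_from_nhtsa_details.py | merge_existing_and_nhtsa
-- ===== SOURCE A (Python) =====
-- import copy
-- from typing import Any
--
-- def sorted_styles_document(data: dict[str, Any]) -> dict[str, Any]:
--     """Sort model keys and style keys for stable diffs."""
--     out: dict[str, Any] = {}
--     for mk in sorted(data.keys(), key=lambda s: s.lower()):
--         inner = data[mk]
--         if not isinstance(inner, dict):
--             out[mk] = inner
--             continue
--         styles_out: dict[str, Any] = {}
--         for sk in sorted(inner.keys(), key=lambda s: s.lower()):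
--             payload = inner[sk]
--             if isinstance(payload, dict) and isinstance(payload.get("years"), list):
--                 styles_out[sk] = {"years": sorted(set(int(x) for x in payload["years"]))}
--             else:
--                 styles_out[sk] = payload
--         out[mk] = styles_out
--     return out
--
-- def merge_existing_and_nhtsa(
--     existing: dict[str, Any] | None,
--     nhtsa_slice: dict[str, dict[str, set[int]]],
-- ) -> dict[str, Any]:
--     """Union years per style key; preserve unrelated models/styles from existing."""
--     base = copy.deepcopy(existing) if isinstance(existing, dict) else {}
--     for mk, styles in nhtsa_slice.items():
--         base.setdefault(mk, {})
--         if not isinstance(base[mk], dict):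
--             base[mk] = {}
--         for sk, years_set in styles.items():
--             cur = base[mk].get(sk)
--             merged_years: set[int] = set(years_set)
--             if isinstance(cur, dict) and isinstance(cur.get("years"), list):
--                 merged_years |= {int(x) for x in cur["years"]}
--             base[mk][sk] = {"years": sorted(merged_years)}
--     return sorted_styles_document(base)
-- ===== SOURCE B (Python) =====
-- def _norm(payload):
--     """Normalize one style payload the way the output format wants it."""
--     if isinstance(payload, dict) and isinstance(payload.get("years"), list):
--         return {"years": sorted({int(x) for x in payload["years"]})}
--     return payload
--
--
-- def merge_existing_and_nhtsa(existing, nhtsa_slice):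
--     """Union years per style key; preserve unrelated models/styles from existing.
--
--     Single pass: iterate the union of model keys in final sorted order, never
--     mutating `existing` and emitting each entry already normalized, so no
--     deepcopy and no second normalization/sorting pass is needed.
--     """
--     ex = existing if isinstance(existing, dict) else {}
--     model_keys = list(ex) + [mk for mk in nhtsa_slice if mk not in ex]
--     out = {}
--     for mk in sorted(model_keys, key=lambda s: s.lower()):
--         styles_n = nhtsa_slice.get(mk)
--         if styles_n is None:
--             inner = ex[mk]
--             if not isinstance(inner, dict):
--                 out[mk] = inner
--                 continue
--             out[mk] = {sk: _norm(inner[sk])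
--                        for sk in sorted(inner, key=lambda s: s.lower())}
--             continue
--         se = ex.get(mk)
--         if not isinstance(se, dict):
--             se = {}
--         style_keys = list(se) + [sk for sk in styles_n if sk not in se]
--         styles_out = {}
--         for sk in sorted(style_keys, key=lambda s: s.lower()):
--             if sk in styles_n:
--                 years = set(styles_n[sk])
--                 cur = se.get(sk)
--                 if isinstance(cur, dict) and isinstance(cur.get("years"), list):
--                     years |= {int(x) for x in cur["years"]}
--                 styles_out[sk] = {"years": sorted(years)}
--             else:
--                 styles_out[sk] = _norm(se[sk])
--         out[mk] = styles_out
--     return out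
-- ===== Notes on version B (the rewrite author's own statement) =====
-- stated objective: alternative
-- what changed: B builds the result in a single keyed pass over the case-insensitively sorted union of model/style keys, combining nhtsa years with existing years and normalizing each payload as it is emitted, instead of A's deepcopy-existing, mutate-in-place, then re-sort-and-renormalize-the-whole-document pipeline; B also never mutates its inputs.
import Mathlib
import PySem

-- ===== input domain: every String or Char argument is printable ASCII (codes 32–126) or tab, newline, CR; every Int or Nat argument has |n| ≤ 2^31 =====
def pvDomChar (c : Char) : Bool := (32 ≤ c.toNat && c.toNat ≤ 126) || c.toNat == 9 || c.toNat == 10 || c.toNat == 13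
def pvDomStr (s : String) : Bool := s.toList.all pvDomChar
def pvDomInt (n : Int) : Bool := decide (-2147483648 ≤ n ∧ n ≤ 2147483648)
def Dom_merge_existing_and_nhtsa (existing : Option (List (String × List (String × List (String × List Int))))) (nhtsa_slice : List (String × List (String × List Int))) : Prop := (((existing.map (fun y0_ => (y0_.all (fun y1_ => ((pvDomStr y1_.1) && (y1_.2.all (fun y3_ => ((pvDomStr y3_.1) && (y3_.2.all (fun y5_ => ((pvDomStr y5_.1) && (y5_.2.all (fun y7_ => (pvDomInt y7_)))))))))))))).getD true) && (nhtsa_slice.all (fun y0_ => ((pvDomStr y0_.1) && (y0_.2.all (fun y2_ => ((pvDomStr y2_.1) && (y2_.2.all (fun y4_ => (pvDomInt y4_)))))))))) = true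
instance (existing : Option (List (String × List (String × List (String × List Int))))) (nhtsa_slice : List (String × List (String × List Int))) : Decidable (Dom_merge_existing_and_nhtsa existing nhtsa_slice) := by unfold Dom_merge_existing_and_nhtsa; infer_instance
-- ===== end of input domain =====

-- B rebuilds the merged document in one keyed pass over the union of model/style keys
-- (no deepcopy-mutate step and no second normalization/sorting pass); return values proved
-- equal on assoc lists without duplicate nhtsa keys (A mutates only its private deepcopy,
-- so there is no observable side effect to match).

-- Nested-dict views of the assoc-list arguments (the Python values are dicts).
abbrev PvPay := PySem.Dict String (List Int)
abbrev PvSty := PySem.Dict String PvPay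
abbrev PvDoc := PySem.Dict String PvSty

def pvWrap2 (st : List (String × List (String × List Int))) : PvSty :=
  PySem.Dict.mk (st.map (fun r => (r.1, PySem.Dict.mk r.2)))
def pvWrapDoc (d : List (String × List (String × List (String × List Int)))) : PvDoc :=
  PySem.Dict.mk (d.map (fun q => (q.1, pvWrap2 q.2)))
def pvUnwrap (out : PvDoc) : List (String × List (String × List (String × List Int))) :=
  out.items.map (fun q => (q.1, q.2.items.map (fun r => (r.1, r.2.items))))

-- ===== PORT A =====

-- merged_years = set(years_set); if cur has a "years" list, merged_years |= {int(x) …};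
-- then sorted(merged_years).  (int(x) is the identity on Int.)
def pvMergedYearsA (cur : Option PvPay) (years_set : List Int) : List Int :=
  let merged : PySem.Set Int := PySem.Set.ofList years_set
  let merged := match cur with
    | some c => match c.get? "years" with
        | some ys => PySem.Set.update merged ys
        | none => merged
    | none => merged
  PySem.List.sorted merged (fun x => x)

-- body of 'for sk, years_set in styles.items()': cur = base[mk].get(sk); base[mk][sk] = {...}
def pvStyleStepA (mk : String) (base : PvDoc) (r : String × List Int) : PvDoc :=
  let inner := base.getD mk PySem.Dict.empty   -- base[mk]; mk is present (setdefault ran)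
  base.insert mk (inner.insert r.1 (PySem.Dict.mk [("years", pvMergedYearsA (inner.get? r.1) r.2)]))

-- body of 'for mk, styles in nhtsa_slice.items()'; base[mk] is a dict by type, so the
-- 'if not isinstance(base[mk], dict)' reset can never fire on the typed domain
def pvModelStepA (base : PvDoc) (q : String × List (String × List Int)) : PvDoc :=
  q.2.foldl (pvStyleStepA q.1) (base.setdefault q.1 PySem.Dict.empty)

-- sorted_styles_document; 'if not isinstance(inner, dict)' never fires on the typed
-- domain, and 'isinstance(payload.get("years"), list)' is just presence of the key
def sorted_styles_document (data : PvDoc) : PvDoc :=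
  (PySem.List.sorted data.keys (fun s => PySem.Str.lower s)).foldl (fun out mk =>
    let inner := data.getD mk PySem.Dict.empty          -- data[mk], mk ∈ data.keys
    let styles_out := (PySem.List.sorted inner.keys (fun s => PySem.Str.lower s)).foldl (fun so sk =>
      let payload := inner.getD sk PySem.Dict.empty     -- inner[sk], sk ∈ inner.keys
      match payload.get? "years" with
      | some ys => so.insert sk (PySem.Dict.mk [("years", PySem.List.sorted (PySem.Set.ofList ys) (fun x => x))])
      | none => so.insert sk payload) PySem.Dict.empty
    out.insert mk styles_out) PySem.Dict.empty

def merge_existing_and_nhtsa (existing : Option (List (String × List (String × List (String × List Int))))) (nhtsa_slice : List (String × List (String × List Int))) : List (String × List (String × List (String × List Int))) :=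
  -- base = copy.deepcopy(existing) if isinstance(existing, dict) else {}
  let base : PvDoc := match existing with
    | some d => pvWrapDoc d
    | none => PySem.Dict.empty
  pvUnwrap (sorted_styles_document (nhtsa_slice.foldl pvModelStepA base))

-- ===== PORT B =====

-- _norm(payload)
def pvNormB (payload : PvPay) : PvPay :=
  match payload.get? "years" with
  | some ys => PySem.Dict.mk [("years", PySem.List.sorted (PySem.Set.ofList ys) (fun x => x))]
  | none => payload

-- years = set(styles_n[sk]); cur = se.get(sk); years |= {int(x) …} when cur has a
-- "years" list; sorted(years)
def pvMergedYearsB (cur : Option PvPay) (ys : List Int) : List Int :=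
  let years : PySem.Set Int := PySem.Set.ofList ys
  let years := match cur with
    | some c => match c.get? "years" with
        | some l => PySem.Set.update years l
        | none => years
    | none => years
  PySem.List.sorted years (fun x => x)

def merge_existing_and_nhtsa_alt (existing : Option (List (String × List (String × List (String × List Int))))) (nhtsa_slice : List (String × List (String × List Int))) : List (String × List (String × List (String × List Int))) :=
  let ex : PvDoc := match existing with           -- ex = existing if dict else {}
    | some d => pvWrapDoc d
    | none => PySem.Dict.empty
  let n := pvWrap2 nhtsa_slice
  -- model_keys = list(ex) + [mk for mk in nhtsa_slice if mk not in ex]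
  let modelKeys := ex.keys ++ n.keys.filter (fun mk => !(ex.contains mk))
  pvUnwrap ((PySem.List.sorted modelKeys (fun s => PySem.Str.lower s)).foldl (fun out mk =>
    match n.get? mk with
    | none =>       -- untouched model: normalize its styles (inner is a dict by type)
      let inner := ex.getD mk PySem.Dict.empty   -- ex[mk]; present since mk ∉ nhtsa
      out.insert mk ((PySem.List.sorted inner.keys (fun s => PySem.Str.lower s)).foldl
        (fun so sk => so.insert sk (pvNormB (inner.getD sk PySem.Dict.empty))) PySem.Dict.empty)
    | some sn =>
      let se := ex.getD mk PySem.Dict.empty      -- se = ex.get(mk) if a dict else {}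
      -- style_keys = list(se) + [sk for sk in styles_n if sk not in se]
      let styleKeys := se.keys ++ sn.keys.filter (fun sk => !(se.contains sk))
      out.insert mk ((PySem.List.sorted styleKeys (fun s => PySem.Str.lower s)).foldl
        (fun so sk =>
          match sn.get? sk with
          | some ys => so.insert sk (PySem.Dict.mk [("years", pvMergedYearsB (se.get? sk) ys)])
          | none => so.insert sk (pvNormB (se.getD sk PySem.Dict.empty))) PySem.Dict.empty)
    ) PySem.Dict.empty)

-- ===== PRECONDITION & SPEC =====
-- Pre_ excludes association lists whose nhtsa_slice carries a duplicate model key or a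
-- duplicate style key inside one model: such lists are not the encoding of any Python
-- dict (dict keys are unique), and the overwrite behaviour on them is accidental.
def Pre_merge_existing_and_nhtsa (existing : Option (List (String × List (String × List (String × List Int))))) (nhtsa_slice : List (String × List (String × List Int))) : Prop :=
  (nhtsa_slice.map Prod.fst).Nodup ∧ ∀ q ∈ nhtsa_slice, (q.2.map Prod.fst).Nodup
instance (existing : Option (List (String × List (String × List (String × List Int))))) (nhtsa_slice : List (String × List (String × List Int))) : Decidable (Pre_merge_existing_and_nhtsa existing nhtsa_slice) := by unfold Pre_merge_existing_and_nhtsa; infer_instance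

def pvWitness_merge_existing_and_nhtsa : (Option (List (String × List (String × List (String × List Int))))) × (List (String × List (String × List Int))) :=
  (some [("Ford", [("GT", [("years", [2005])])])],
   [("Ford", [("GT", [2006, 2005])]), ("Kia", [("Rio", [2001])])])

def Spec_merge_existing_and_nhtsa (existing : Option (List (String × List (String × List (String × List Int))))) (nhtsa_slice : List (String × List (String × List Int))) (out : List (String × List (String × List (String × List Int)))) : Prop := out = merge_existing_and_nhtsa_alt existing nhtsa_slice
instance (existing : Option (List (String × List (String × List (String × List Int))))) (nhtsa_slice : List (String × List (String × List Int))) (out : List (String × List (String × List (String × List Int)))) : Decidable (Spec_merge_existing_and_nhtsa existing nhtsa_slice out) := by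
  unfold Spec_merge_existing_and_nhtsa
  -- default instance-search size is too small for the deeply nested list type: chain it up
  haveI h1 : DecidableEq (List (String × List Int)) := inferInstance
  haveI h2 : DecidableEq (List (String × List (String × List Int))) := inferInstance
  haveI h3 : DecidableEq (String × List (String × List (String × List Int))) := inferInstance
  infer_instance

-- ===== CLAIM (what is proved, stated in full; the proofs are below) =====
def Claim_equal_merge_existing_and_nhtsa : Prop := ∀ (existing : Option (List (String × List (String × List (String × List Int))))) (nhtsa_slice : List (String × List (String × List Int))), Dom_merge_existing_and_nhtsa existing nhtsa_slice → Pre_merge_existing_and_nhtsa existing nhtsa_slice → Spec_merge_existing_and_nhtsa existing nhtsa_slice (merge_existing_and_nhtsa existing nhtsa_slice)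

-- ===== LEMMAS AND PROOFS =====

-- the effect of one nhtsa style entry on base[mk], with mk's slot factored out
def pvInnerStep (inner : PvSty) (r : String × List Int) : PvSty :=
  inner.insert r.1 (PySem.Dict.mk [("years", pvMergedYearsA (inner.get? r.1) r.2)])

theorem pvWrap2_keys (st : List (String × List (String × List Int))) :
    (pvWrap2 st).keys = st.map Prod.fst := by
  simp [pvWrap2, PySem.Dict.keys]

theorem pvContains_eq_set {ν : Type} (d : PySem.Dict String ν) (k : String) :
    d.contains k = PySem.Set.contains d.keys k := by
  simp only [PySem.Dict.contains, PySem.Set.contains, PySem.Dict.keys]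
  rw [Bool.eq_iff_iff]
  simp [List.any_eq_true]

theorem pvFind?_eq_none_of_not_contains {ν : Type} (d : PySem.Dict String ν) (k : String)
    (h : ¬ d.contains k = true) : List.find? (fun p => p.1 == k) d.items = none := by
  rw [List.find?_eq_none]
  intro x hx
  simp only [PySem.Dict.contains, List.any_eq_true] at h
  push Not at h
  exact h x hx

theorem pvSetdefault_get?_self {ν : Type} (d : PySem.Dict String ν) (k : String) (v : ν) :
    (d.setdefault k v).get? k = some (d.getD k v) := by
  unfold PySem.Dict.setdefault PySem.Dict.getD
  by_cases h : d.contains k = true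
  · simp only [h, if_true]
    cases hg : d.get? k with
    | some w => simp
    | none => exfalso
              rw [PySem.Dict.contains_eq_isSome_get?, hg] at h
              simp at h
  · simp only [h]
    have hfind := pvFind?_eq_none_of_not_contains d k h
    have hg : d.get? k = none := by simp [PySem.Dict.get?, hfind]
    simp [PySem.Dict.get?, List.find?_append, hfind]

theorem pvSetdefault_get?_other {ν : Type} (d : PySem.Dict String ν) (k k' : String) (v : ν)
    (h : k' ≠ k) : (d.setdefault k v).get? k' = d.get? k' := by
  unfold PySem.Dict.setdefault
  by_cases hc : d.contains k = true
  · simp [hc]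
  · simp only [hc]
    simp [PySem.Dict.get?, List.find?_append]
    cases hg : List.find? (fun p => p.1 == k') d.items with
    | some w => simp
    | none => simp [Ne.symm h]

theorem pvSetdefault_keys {ν : Type} (d : PySem.Dict String ν) (k : String) (v : ν) :
    (d.setdefault k v).keys = PySem.Set.add d.keys k := by
  unfold PySem.Dict.setdefault PySem.Set.add
  rw [pvContains_eq_set]
  have hc : PySem.Set.contains d.keys k = decide (k ∈ d.keys) := by
    simp [PySem.Set.contains]
  rw [hc]
  simp only [PySem.Dict.keys]
  by_cases hm : k ∈ List.map (fun x => x.1) d.items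
  · simp [hm]
  · simp [hm]

theorem pvKeys_insert {ν : Type} (d : PySem.Dict String ν) (k : String) (v : ν) :
    (d.insert k v).keys = PySem.Set.add d.keys k := by
  unfold PySem.Dict.insert PySem.Set.add
  rw [pvContains_eq_set]
  have hc : PySem.Set.contains d.keys k = decide (k ∈ d.keys) := by
    simp [PySem.Set.contains]
  rw [hc]
  simp only [PySem.Dict.keys]
  by_cases hm : k ∈ List.map (fun x => x.1) d.items
  · simp only [hm, decide_true, if_true]
    rw [List.map_map]
    apply List.map_congr_left
    intro p _
    by_cases hp : p.1 = k
    · simp [hp]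
    · simp [hp]
  · simp [hm]

-- the inner style loop of A, with the mk slot held in `inner0`
theorem pvStyleFold_get? (mkk : String) (styles : List (String × List Int)) (b : PvDoc)
    (inner0 : PvSty) (h : b.get? mkk = some inner0) (mk0 : String) :
    (styles.foldl (pvStyleStepA mkk) b).get? mk0 =
      if mk0 = mkk then some (styles.foldl pvInnerStep inner0) else b.get? mk0 := by
  induction styles generalizing b inner0 with
  | nil =>
    simp only [List.foldl_nil]
    split_ifs with he
    · subst he; exact h
    · rfl
  | cons r rest ih =>
    simp only [List.foldl_cons]
    have hb : b.getD mkk PySem.Dict.empty = inner0 := by simp [PySem.Dict.getD, h]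
    have hstep : pvStyleStepA mkk b r = b.insert mkk (pvInnerStep inner0 r) := by
      simp [pvStyleStepA, pvInnerStep, hb]
    rw [hstep, ih (b.insert mkk (pvInnerStep inner0 r)) (pvInnerStep inner0 r)
      (PySem.Dict.get?_insert_self b mkk (pvInnerStep inner0 r))]
    split_ifs with he
    · rfl
    · exact PySem.Dict.get?_insert_of_ne b (pvInnerStep inner0 r) he

theorem pvStyleFold_keys (mkk : String) (styles : List (String × List Int)) (b : PvDoc)
    (h : mkk ∈ b.keys) : (styles.foldl (pvStyleStepA mkk) b).keys = b.keys := by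
  induction styles generalizing b with
  | nil => rfl
  | cons r rest ih =>
    simp only [List.foldl_cons]
    have hk : (pvStyleStepA mkk b r).keys = b.keys := by
      simp only [pvStyleStepA, pvKeys_insert]
      exact PySem.Set.add_of_mem h
    rw [ih (pvStyleStepA mkk b r) (hk ▸ h), hk]

theorem pvModelStepA_get? (base : PvDoc) (q : String × List (String × List Int)) (mk0 : String) :
    (pvModelStepA base q).get? mk0 =
      if mk0 = q.1 then some (q.2.foldl pvInnerStep (base.getD q.1 PySem.Dict.empty))
      else base.get? mk0 := by
  unfold pvModelStepA
  rw [pvStyleFold_get? q.1 q.2 _ (base.getD q.1 PySem.Dict.empty)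
    (pvSetdefault_get?_self base q.1 PySem.Dict.empty)]
  split_ifs with he
  · rfl
  · exact pvSetdefault_get?_other base q.1 mk0 PySem.Dict.empty he

theorem pvModelStepA_keys (base : PvDoc) (q : String × List (String × List Int)) :
    (pvModelStepA base q).keys = PySem.Set.add base.keys q.1 := by
  unfold pvModelStepA
  rw [pvStyleFold_keys q.1 q.2 _ (by
    rw [pvSetdefault_keys]
    exact (PySem.Set.mem_add _ _ _).mpr (Or.inr rfl))]
  exact pvSetdefault_keys base q.1 PySem.Dict.empty

theorem pvBaseFold_keys (nhtsa : List (String × List (String × List Int))) (base : PvDoc) :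
    (nhtsa.foldl pvModelStepA base).keys = PySem.Set.update base.keys (nhtsa.map Prod.fst) := by
  induction nhtsa generalizing base with
  | nil => rfl
  | cons q rest ih =>
    simp only [List.foldl_cons, List.map_cons]
    rw [ih (pvModelStepA base q), pvModelStepA_keys, PySem.Set.update_cons]

theorem pvWrap2_get?_nil (k : String) : (pvWrap2 []).get? k = none := by
  simp [pvWrap2, PySem.Dict.get?]

theorem pvWrap2_get?_cons (q : String × List (String × List Int))
    (rest : List (String × List (String × List Int))) (k : String) :
    (pvWrap2 (q :: rest)).get? k =
      if q.1 = k then some (PySem.Dict.mk q.2) else (pvWrap2 rest).get? k := by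
  simp only [pvWrap2, List.map_cons]
  rw [PySem.Dict.get?_mk_cons]
  by_cases he : q.1 = k
  · simp [he]
  · simp [he]

theorem pvWrap2_get?_inv (l : List (String × List (String × List Int))) (k : String)
    (sn : PySem.Dict String (List Int)) (h : (pvWrap2 l).get? k = some sn) :
    ∃ q ∈ l, sn = PySem.Dict.mk q.2 := by
  induction l with
  | nil => rw [pvWrap2_get?_nil] at h; cases h
  | cons q rest ih =>
    rw [pvWrap2_get?_cons] at h
    by_cases he : q.1 = k
    · simp only [he, if_true] at h
      exact ⟨q, List.mem_cons_self, (Option.some_inj.mp h).symm⟩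
    · simp only [he, if_false] at h
      obtain ⟨q', hq', hsn⟩ := ih h
      exact ⟨q', List.mem_cons_of_mem q hq', hsn⟩

theorem pvBaseFold_get? (nhtsa : List (String × List (String × List Int))) (base : PvDoc)
    (hn : (nhtsa.map Prod.fst).Nodup) (mk0 : String) :
    (nhtsa.foldl pvModelStepA base).get? mk0 =
      match (pvWrap2 nhtsa).get? mk0 with
      | some sn => some (sn.items.foldl pvInnerStep (base.getD mk0 PySem.Dict.empty))
      | none => base.get? mk0 := by
  induction nhtsa generalizing base with
  | nil => rw [pvWrap2_get?_nil]; rfl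
  | cons q rest ih =>
    simp only [List.map_cons, List.nodup_cons] at hn
    obtain ⟨hq, hrest⟩ := hn
    simp only [List.foldl_cons]
    rw [ih (pvModelStepA base q) hrest, pvWrap2_get?_cons]
    by_cases he : q.1 = mk0
    · subst he
      have hnone : (pvWrap2 rest).get? q.1 = none := by
        rw [PySem.Dict.get?_eq_none_iff_not_mem_keys, pvWrap2_keys]
        exact hq
      rw [hnone, if_pos rfl]
      rw [pvModelStepA_get?, if_pos rfl]
    · rw [if_neg he]
      have hget : (pvModelStepA base q).get? mk0 = base.get? mk0 := by
        rw [pvModelStepA_get?, if_neg (fun hh => he hh.symm)]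
      have hgetD : (pvModelStepA base q).getD mk0 PySem.Dict.empty
          = base.getD mk0 PySem.Dict.empty := by
        simp [PySem.Dict.getD, hget]
      cases hsn : (pvWrap2 rest).get? mk0 with
      | some sn => simp only [hgetD]
      | none => simp only [hget]

theorem pvInnerFold_get? (styles : List (String × List Int)) (se : PvSty)
    (hn : (styles.map Prod.fst).Nodup) (sk : String) :
    (styles.foldl pvInnerStep se).get? sk =
      match (PySem.Dict.mk styles).get? sk with
      | some ys => some (PySem.Dict.mk [("years", pvMergedYearsA (se.get? sk) ys)])
      | none => se.get? sk := by
  induction styles generalizing se with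
  | nil => simp [PySem.Dict.get?]
  | cons r rest ih =>
    simp only [List.map_cons, List.nodup_cons] at hn
    obtain ⟨hr, hrest⟩ := hn
    simp only [List.foldl_cons]
    rw [ih (pvInnerStep se r) hrest, PySem.Dict.get?_mk_cons]
    by_cases he : r.1 = sk
    · subst he
      have hnone : (PySem.Dict.mk rest).get? r.1 = none := by
        rw [PySem.Dict.get?_eq_none_iff_not_mem_keys, PySem.Dict.keys_mk]
        simpa using hr
      rw [hnone]
      simp only [beq_self_eq_true, if_true]
      unfold pvInnerStep
      rw [PySem.Dict.get?_insert_self]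
    · have hbe : (r.1 == sk) = false := by simp [he]
      rw [hbe]
      simp only [Bool.false_eq_true, if_false]
      have hget : (pvInnerStep se r).get? sk = se.get? sk :=
        PySem.Dict.get?_insert_of_ne se _ (fun hh => he hh.symm)
      cases hys : (PySem.Dict.mk rest).get? sk with
      | some ys => simp only [hget]
      | none => simp only [hget]

theorem pvInnerFold_keys (styles : List (String × List Int)) (se : PvSty) :
    (styles.foldl pvInnerStep se).keys = PySem.Set.update se.keys (styles.map Prod.fst) := by
  induction styles generalizing se with
  | nil => rfl
  | cons r rest ih =>
    simp only [List.foldl_cons, List.map_cons]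
    rw [ih (pvInnerStep se r), PySem.Set.update_cons]
    unfold pvInnerStep
    rw [pvKeys_insert]

theorem pvNodup_update (s : PySem.Set Int) (l : List Int) (h : s.Nodup) :
    (PySem.Set.update s l).Nodup := by
  induction l generalizing s with
  | nil => exact h
  | cons x rest ih => exact ih (PySem.Set.add s x) (PySem.Set.nodup_add s x h)

theorem pvMergedYears_shape (cur : Option PvPay) (ys : List Int) :
    ∃ m : PySem.Set Int, m.Nodup ∧ pvMergedYearsA cur ys = PySem.List.sorted m (fun x => x) := by
  unfold pvMergedYearsA
  dsimp only
  cases cur with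
  | none => exact ⟨_, PySem.Set.nodup_ofList ys, rfl⟩
  | some c =>
    cases hys : c.get? "years" with
    | some l =>
      refine ⟨_, pvNodup_update _ l (PySem.Set.nodup_ofList ys), ?_⟩
      simp only [hys]
    | none =>
      refine ⟨_, PySem.Set.nodup_ofList ys, ?_⟩
      simp only [hys]

theorem pvMergedYears_nodup (cur : Option PvPay) (ys : List Int) :
    (pvMergedYearsA cur ys).Nodup := by
  obtain ⟨m, hm, he⟩ := pvMergedYears_shape cur ys
  rw [he]
  exact ((PySem.List.sorted_perm m (fun x => x) false).nodup_iff).mpr hm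

theorem pvMergedYearsB_eq (cur : Option PvPay) (ys : List Int) :
    pvMergedYearsB cur ys = pvMergedYearsA cur ys := rfl

-- sorting the set of an already sorted(set …) year list is the identity
theorem pvSortedSet_merged (cur : Option PvPay) (ys : List Int) :
    PySem.List.sorted (PySem.Set.ofList (pvMergedYearsA cur ys)) (fun x => x)
      = pvMergedYearsA cur ys := by
  rw [PySem.Set.ofList_eq_self_of_nodup _ (pvMergedYears_nodup cur ys)]
  obtain ⟨m, _, he⟩ := pvMergedYears_shape cur ys
  rw [he, PySem.List.sorted_sorted]

theorem pvSnKeys (sn : PySem.Dict String (List Int)) : sn.keys = sn.items.map Prod.fst := rfl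

-- the whole claim, with the converted `existing` dict abstracted
theorem pvMain (ex : PvDoc) (nhtsa : List (String × List (String × List Int)))
    (hn1 : (nhtsa.map Prod.fst).Nodup) (hn2 : ∀ q ∈ nhtsa, (q.2.map Prod.fst).Nodup) :
    sorted_styles_document (nhtsa.foldl pvModelStepA ex) =
      (PySem.List.sorted (ex.keys ++ (pvWrap2 nhtsa).keys.filter (fun mk => !(ex.contains mk)))
          (fun s => PySem.Str.lower s)).foldl (fun out mk =>
        match (pvWrap2 nhtsa).get? mk with
        | none =>
          out.insert mk ((PySem.List.sorted (ex.getD mk PySem.Dict.empty).keys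
              (fun s => PySem.Str.lower s)).foldl
            (fun so sk => so.insert sk (pvNormB ((ex.getD mk PySem.Dict.empty).getD sk
              PySem.Dict.empty))) PySem.Dict.empty)
        | some sn =>
          out.insert mk ((PySem.List.sorted ((ex.getD mk PySem.Dict.empty).keys
              ++ sn.keys.filter (fun sk => !((ex.getD mk PySem.Dict.empty).contains sk)))
              (fun s => PySem.Str.lower s)).foldl
            (fun so sk =>
              match sn.get? sk with
              | some ys => so.insert sk (PySem.Dict.mk [("years",
                  pvMergedYearsB ((ex.getD mk PySem.Dict.empty).get? sk) ys)])
              | none => so.insert sk (pvNormB ((ex.getD mk PySem.Dict.empty).getD sk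
                  PySem.Dict.empty))) PySem.Dict.empty)
        ) PySem.Dict.empty := by
  unfold sorted_styles_document
  have hkeys : (nhtsa.foldl pvModelStepA ex).keys
      = ex.keys ++ (pvWrap2 nhtsa).keys.filter (fun mk => !(ex.contains mk)) := by
    rw [pvBaseFold_keys, PySem.Set.update_eq_append_filter,
      PySem.Set.ofList_eq_self_of_nodup _ hn1, pvWrap2_keys]
    congr 1
    apply List.filter_congr
    intro mk _
    rw [pvContains_eq_set]
  rw [hkeys]
  apply PySem.List.foldl_congr_mem
  intro out mk _
  have hR := pvBaseFold_get? nhtsa ex hn1 mk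
  cases hsn : (pvWrap2 nhtsa).get? mk with
  | none =>
    rw [hsn] at hR
    have hgetD : (nhtsa.foldl pvModelStepA ex).getD mk PySem.Dict.empty
        = ex.getD mk PySem.Dict.empty := by simp [PySem.Dict.getD, hR]
    dsimp only
    rw [hgetD]
    congr 1
    apply PySem.List.foldl_congr_mem
    intro so sk _
    cases hp : ((ex.getD mk PySem.Dict.empty).getD sk PySem.Dict.empty).get? "years" with
    | some ys => simp only [pvNormB, hp]
    | none => simp only [pvNormB, hp]
  | some sn =>
    obtain ⟨q, hqmem, hsneq⟩ := pvWrap2_get?_inv nhtsa mk sn hsn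
    have hsnnd : (sn.items.map Prod.fst).Nodup := by
      rw [hsneq]
      exact hn2 q hqmem
    rw [hsn] at hR
    have hgetD : (nhtsa.foldl pvModelStepA ex).getD mk PySem.Dict.empty
        = sn.items.foldl pvInnerStep (ex.getD mk PySem.Dict.empty) := by
      simp [PySem.Dict.getD, hR]
    dsimp only
    rw [hgetD]
    congr 1
    have hkeys2 : (sn.items.foldl pvInnerStep (ex.getD mk PySem.Dict.empty)).keys
        = (ex.getD mk PySem.Dict.empty).keys
          ++ sn.keys.filter (fun sk => !((ex.getD mk PySem.Dict.empty).contains sk)) := by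
      rw [pvInnerFold_keys, PySem.Set.update_eq_append_filter,
        PySem.Set.ofList_eq_self_of_nodup _ hsnnd, pvSnKeys]
      congr 1
      apply List.filter_congr
      intro sk _
      rw [pvContains_eq_set]
    rw [hkeys2]
    apply PySem.List.foldl_congr_mem
    intro so sk _
    have hI := pvInnerFold_get? sn.items (ex.getD mk PySem.Dict.empty) hsnnd sk
    rw [show PySem.Dict.mk sn.items = sn from rfl] at hI
    cases hys : sn.get? sk with
    | some ys =>
      rw [hys] at hI
      dsimp only at hI
      have hpayload : (sn.items.foldl pvInnerStep (ex.getD mk PySem.Dict.empty)).getD sk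
          PySem.Dict.empty
          = PySem.Dict.mk [("years", pvMergedYearsA ((ex.getD mk PySem.Dict.empty).get? sk) ys)] := by
        simp only [PySem.Dict.getD] at hI ⊢
        rw [hI]
        rfl
      rw [hpayload]
      have hg : (PySem.Dict.mk [("years",
          pvMergedYearsA ((ex.getD mk PySem.Dict.empty).get? sk) ys)]).get? "years"
          = some (pvMergedYearsA ((ex.getD mk PySem.Dict.empty).get? sk) ys) := by
        simp [PySem.Dict.get?]
      rw [hg]
      dsimp only
      rw [pvSortedSet_merged, pvMergedYearsB_eq]
    | none =>
      rw [hys] at hI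
      dsimp only at hI
      have hpayload : (sn.items.foldl pvInnerStep (ex.getD mk PySem.Dict.empty)).getD sk
          PySem.Dict.empty = (ex.getD mk PySem.Dict.empty).getD sk PySem.Dict.empty := by
        simp only [PySem.Dict.getD] at hI ⊢
        rw [hI]
      rw [hpayload]
      cases hp : ((ex.getD mk PySem.Dict.empty).getD sk PySem.Dict.empty).get? "years" with
      | some ys => simp only [pvNormB, hp]
      | none => simp only [pvNormB, hp]

-- ===== VERDICT (by name: the statement is the Claim_ definition above) =====
theorem merge_existing_and_nhtsa_spec : Claim_equal_merge_existing_and_nhtsa := by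
  intro existing nhtsa _dom hpre
  obtain ⟨hn1, hn2⟩ := hpre
  unfold Spec_merge_existing_and_nhtsa
  cases existing with
  | none => exact congrArg pvUnwrap (pvMain PySem.Dict.empty nhtsa hn1 hn2)
  | some d => exact congrArg pvUnwrap (pvMain (pvWrapDoc d) nhtsa hn1 hn2)
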